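-- pv_equiv track=rewrite | github.com/lazoprogram/goa-homework | day 46/classwork/classwork.py | define_suit
-- ===== SOURCE A (Python) =====
-- def define_suit(card):
--     for i in card.lower():
--         if i == "c":
--             return "clubs"
--         elif i == "d":
--             return "diamonds"
--         elif i == "h":
--             return "hearts"
--         elif i == "s":
--             return "spades"
-- ===== SOURCE B (Python) =====
-- def define_suit(card):
--     low = card.lower()
--     suits = {'c': 'clubs', 'd': 'diamonds', 'h': 'hearts', 's': 'spades'}
--     pairs = [(low.find(letter), suit) for letter, suit in suits.items()
--              if low.find(letter) != -1]
--     if not pairs: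
--         return None
--     return min(pairs, key=lambda p: p[0])[1]
-- ===== Notes on version B (the rewrite author's own statement) =====
-- stated objective: alternative
-- what changed: Replaces the early-returning forward character scan with an index-then-select computation: find each suit letter's first position in the lowered string, keep the found ones, and return the suit at the minimum position.
import Mathlib
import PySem

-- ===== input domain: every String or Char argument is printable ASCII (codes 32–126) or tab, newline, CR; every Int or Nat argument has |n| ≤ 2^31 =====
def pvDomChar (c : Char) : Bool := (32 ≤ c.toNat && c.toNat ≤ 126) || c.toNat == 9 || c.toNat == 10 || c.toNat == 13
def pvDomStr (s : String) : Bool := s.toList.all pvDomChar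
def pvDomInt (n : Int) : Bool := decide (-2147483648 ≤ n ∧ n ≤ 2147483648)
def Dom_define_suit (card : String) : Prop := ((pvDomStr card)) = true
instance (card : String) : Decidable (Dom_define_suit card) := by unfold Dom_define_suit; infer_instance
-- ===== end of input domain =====

-- B replaces A's early-returning forward scan by a find-each-letter-then-min-index selection; same cost, different decomposition.


-- ===== PORT A =====
-- the for-loop with early returns, over the lowered string's characters
def defineSuitLoop : List Char → Option String
  | [] => none
  | i :: rest =>
    if i = 'c' then some "clubs"
    else if i = 'd' then some "diamonds"
    else if i = 'h' then some "hearts"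
    else if i = 's' then some "spades"
    else defineSuitLoop rest

def define_suit (card : String) : Option String :=
  defineSuitLoop (PySem.Str.lower card).toList

-- ===== PORT B =====
-- the suit map, in Source B's insertion order
def suitTable : List (Char × String) :=
  [('c', "clubs"), ('d', "diamonds"), ('h', "hearts"), ('s', "spades")]

-- the (first-index, suit) pairs for the letters that occur
def suitPairs (low : List Char) : List (Int × String) :=
  (suitTable.map (fun p => (PySem.Chars.find low [p.1], p.2))).filter
    (fun q => !(q.1 == -1))

-- if no letter occurs return None, else the suit at the minimum first index
def define_suit_alt (card : String) : Option String :=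
  let low := (PySem.Str.lower card).toList
  match PySem.List.min? (suitPairs low) (fun q => q.1) with
  | none => none
  | some q => some q.2

-- ===== PRECONDITION & SPEC =====
def Spec_define_suit (card : String) (out : Option String) : Prop := out = define_suit_alt card
instance (card : String) (out : Option String) : Decidable (Spec_define_suit card out) := by unfold Spec_define_suit; infer_instance

-- ===== CLAIM (what is proved, stated in full; the proofs are below) =====
def Claim_equal_define_suit : Prop := ∀ (card : String), Dom_define_suit card → Spec_define_suit card (define_suit card)

-- ===== LEMMAS AND PROOFS =====

-- the step function of PySem.List.min? with key = first component, named for reasoning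
def pvStep (acc : Option (Int × String)) (x : Int × String) : Option (Int × String) :=
  match acc with | none => some x | some m => if x.1 < m.1 then some x else some m

theorem pv_min?_eq (xs : List (Int × String)) :
    PySem.List.min? xs (fun q => q.1) = xs.foldl pvStep none := by
  simp only [PySem.List.min?]
  congr 1
  funext acc x
  cases acc <;> rfl

-- find.go started at k is the k-shift of find.go started at 0 (unless absent)
theorem pv_go_shift (sub rest : List Char) (k : Nat) :
    PySem.Chars.find.go sub rest k =
      if PySem.Chars.find.go sub rest 0 = -1 then -1 else PySem.Chars.find.go sub rest 0 + k := by
  induction rest generalizing k with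
  | nil =>
    simp only [PySem.Chars.find.go]
    split_ifs
    all_goals simp_all
  | cons h t ih =>
    have hb : (-1 : Int) ≤ PySem.Chars.find.go sub t 0 := PySem.Chars.neg_one_le_find t sub
    rw [show PySem.Chars.find.go sub (h :: t) k =
          if sub.isPrefixOf (h :: t) then (k : Int) else PySem.Chars.find.go sub t (k + 1) from rfl,
        show PySem.Chars.find.go sub (h :: t) 0 =
          if sub.isPrefixOf (h :: t) then (0 : Int) else PySem.Chars.find.go sub t 1 from rfl]
    rw [ih (k + 1), ih 1]
    split_ifs <;> push_cast <;> omega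

-- how a single-character find unfolds on a cons
theorem pv_find_cons (i : Char) (rest : List Char) (c : Char) :
    PySem.Chars.find (i :: rest) [c] =
      if i = c then 0
      else (if PySem.Chars.find rest [c] = -1 then -1 else PySem.Chars.find rest [c] + 1) := by
  simp only [PySem.Chars.find]
  rw [show PySem.Chars.find.go [c] (i :: rest) 0 =
        if [c].isPrefixOf (i :: rest) then (0 : Int) else PySem.Chars.find.go [c] rest 1 from rfl,
      pv_go_shift [c] rest 1]
  have hp : [c].isPrefixOf (i :: rest) = (c == i) := by simp [List.isPrefixOf]
  rw [hp]
  by_cases h : i = c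
  · simp [h]
  · have hb : (c == i) = false := by simp [Ne.symm h]
    rw [hb]
    simp only [Bool.false_eq_true, if_false]
    split_ifs <;> push_cast <;> omega

-- folding over entries that never beat the accumulator keeps it
theorem pv_foldl_keep (m : Int × String) (t : List (Int × String))
    (h : ∀ y ∈ t, ¬ y.1 < m.1) :
    t.foldl pvStep (some m) = some m := by
  induction t with
  | nil => rfl
  | cons y t' ih =>
    simp only [List.foldl]
    rw [show pvStep (some m) y = some m by simp [pvStep, h y (by simp)]]
    exact ih (fun z hz => h z (by simp [hz]))

-- folding positive-key entries yields none or an element with positive key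
theorem pv_fold_pos (P : List (Int × String)) (hP : ∀ y ∈ P, 1 ≤ y.1)
    (acc : Option (Int × String))
    (hacc : acc = none ∨ ∃ m, acc = some m ∧ 1 ≤ m.1) :
    P.foldl pvStep acc = none ∨ ∃ m, P.foldl pvStep acc = some m ∧ 1 ≤ m.1 := by
  induction P generalizing acc with
  | nil => simpa using hacc
  | cons y t ih =>
    have hy := hP y (by simp)
    simp only [List.foldl]
    apply ih (fun z hz => hP z (by simp [hz]))
    rcases hacc with h | ⟨m, hm, hm1⟩
    · subst h; exact Or.inr ⟨y, rfl, hy⟩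
    · subst hm
      by_cases hc : y.1 < m.1
      · exact Or.inr ⟨y, by simp [pvStep, hc], hy⟩
      · exact Or.inr ⟨m, by simp [pvStep, hc], hm1⟩

-- the minimum of positive-key entries, a zero-key entry, then nonnegative-key entries
theorem pv_min?_split (P T : List (Int × String)) (z : Int × String) (hz : z.1 = 0)
    (hP : ∀ y ∈ P, 1 ≤ y.1) (hT : ∀ y ∈ T, 0 ≤ y.1) :
    PySem.List.min? (P ++ z :: T) (fun q => q.1) = some z := by
  rw [pv_min?_eq, List.foldl_append]
  rcases pv_fold_pos P hP none (Or.inl rfl) with h | ⟨m, hm, hm1⟩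
  · rw [h]
    simp only [List.foldl]
    rw [show pvStep none z = some z from rfl]
    exact pv_foldl_keep z T (fun y hy => by have := hT y hy; omega)
  · rw [hm]
    simp only [List.foldl]
    rw [show pvStep (some m) z = some z by simp [pvStep]; omega]
    exact pv_foldl_keep z T (fun y hy => by have := hT y hy; omega)

-- min? commutes with shifting every key by +1
theorem pv_min_shift (ps : List (Int × String)) :
    PySem.List.min? (ps.map (fun q => (q.1 + 1, q.2))) (fun q => q.1) =
      (PySem.List.min? ps (fun q => q.1)).map (fun q => (q.1 + 1, q.2)) := by
  rw [pv_min?_eq, pv_min?_eq]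
  suffices h : ∀ acc : Option (Int × String),
      (ps.map (fun q => (q.1 + 1, q.2))).foldl pvStep (acc.map (fun q => (q.1 + 1, q.2))) =
        (ps.foldl pvStep acc).map (fun q => (q.1 + 1, q.2)) by
    simpa using h none
  induction ps with
  | nil => intro acc; rfl
  | cons y t ih =>
    intro acc
    simp only [List.map, List.foldl]
    rcases acc with _ | m
    · simpa using ih (some y)
    · simp only [Option.map_some]
      by_cases hc : y.1 < m.1
      · rw [show pvStep (some (m.1 + 1, m.2)) (y.1 + 1, y.2) = some (y.1 + 1, y.2) by
              simp [pvStep]; omega,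
            show pvStep (some m) y = some y by simp [pvStep, hc]]
        simpa using ih (some y)
      · rw [show pvStep (some (m.1 + 1, m.2)) (y.1 + 1, y.2) = some (m.1 + 1, m.2) by
              simp [pvStep]; omega,
            show pvStep (some m) y = some m by simp [pvStep, hc]]
        simpa using ih (some m)

-- every kept pair's key is a find result that is not -1, hence ≥ 0
theorem pv_filter_nonneg (l : List Char) (tbl : List (Char × String)) :
    ∀ y ∈ (tbl.map (fun p => (PySem.Chars.find l [p.1], p.2))).filter (fun q => !(q.1 == -1)),
      0 ≤ y.1 := by
  intro y hy
  rw [List.mem_filter] at hy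
  obtain ⟨hmem, hne⟩ := hy
  rw [List.mem_map] at hmem
  obtain ⟨p, _, rfl⟩ := hmem
  have h1 := PySem.Chars.neg_one_le_find l [p.1]
  simp only [Bool.not_eq_eq_eq_not, Bool.not_true, beq_eq_false_iff_ne, ne_eq] at hne
  omega

-- over a cons whose head matches no table letter, kept keys are ≥ 1
theorem pv_filter_pos (l : List Char) (i : Char) (tbl : List (Char × String))
    (hne : ∀ p ∈ tbl, i ≠ p.1) :
    ∀ y ∈ (tbl.map (fun p => (PySem.Chars.find (i :: l) [p.1], p.2))).filter
        (fun q => !(q.1 == -1)), 1 ≤ y.1 := by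
  intro y hy
  rw [List.mem_filter] at hy
  obtain ⟨hmem, hkeep⟩ := hy
  rw [List.mem_map] at hmem
  obtain ⟨p, hp, rfl⟩ := hmem
  have h1 := PySem.Chars.neg_one_le_find l [p.1]
  rw [pv_find_cons, if_neg (hne p hp)] at hkeep ⊢
  simp only [Bool.not_eq_eq_eq_not, Bool.not_true, beq_eq_false_iff_ne, ne_eq] at hkeep
  split_ifs at hkeep ⊢ with h
  · omega
  · omega

-- over a cons whose head matches no table letter, the pair list is the shifted pair list of the tail
theorem pv_pairs_shift_gen (l : List Char) (i : Char) (tbl : List (Char × String))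
    (hne : ∀ p ∈ tbl, i ≠ p.1) :
    (tbl.map (fun p => (PySem.Chars.find (i :: l) [p.1], p.2))).filter (fun q => !(q.1 == -1)) =
      ((tbl.map (fun p => (PySem.Chars.find l [p.1], p.2))).filter (fun q => !(q.1 == -1))).map
        (fun q => (q.1 + 1, q.2)) := by
  induction tbl with
  | nil => rfl
  | cons p t ih =>
    have hni := hne p (by simp)
    have hrec := ih (fun q hq => hne q (by simp [hq]))
    simp only [List.map, List.filter_cons]
    rw [pv_find_cons, if_neg hni]
    have h1 := PySem.Chars.neg_one_le_find l [p.1]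
    by_cases h : PySem.Chars.find l [p.1] = -1
    · simp [h, hrec]
    · have h2 : PySem.Chars.find l [p.1] + 1 ≠ -1 := by omega
      simp [h, h2, hrec]

-- when the head IS table letter number |tbl1|, the min-selection returns its suit
theorem pv_case (rest : List Char) (i : Char) (tbl1 tbl2 : List (Char × String)) (s : String)
    (h1 : ∀ p ∈ tbl1, i ≠ p.1) :
    (match PySem.List.min?
        (((tbl1 ++ (i, s) :: tbl2).map
            (fun p => (PySem.Chars.find (i :: rest) [p.1], p.2))).filter
          (fun q => !(q.1 == -1))) (fun q => q.1) with
     | none => none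
     | some q => some q.2) = some s := by
  rw [List.map_append, List.filter_append, List.map_cons, List.filter_cons]
  rw [show PySem.Chars.find (i :: rest) [i] = 0 by rw [pv_find_cons, if_pos rfl]]
  simp only [show (!((0 : Int) == -1)) = true from rfl, if_pos]
  rw [pv_min?_split _ _ (0, s) rfl (pv_filter_pos rest i tbl1 h1)
        (pv_filter_nonneg (i :: rest) tbl2)]

-- the loop on the character list agrees with the find-then-min computation
theorem pv_key (l : List Char) :
    defineSuitLoop l =
      (match PySem.List.min? (suitPairs l) (fun q => q.1) with
       | none => none
       | some q => some q.2) := by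
  induction l with
  | nil => decide
  | cons i rest ih =>
    by_cases e1 : i = 'c'
    · subst e1
      rw [show defineSuitLoop ('c' :: rest) = some "clubs" from rfl]
      simp only [suitPairs]
      rw [show suitTable = [] ++ ('c', "clubs") ::
            [('d', "diamonds"), ('h', "hearts"), ('s', "spades")] from rfl]
      exact (pv_case rest 'c' _ _ "clubs" (by decide)).symm
    · by_cases e2 : i = 'd'
      · subst e2
        rw [show defineSuitLoop ('d' :: rest) = some "diamonds" from rfl]
        simp only [suitPairs]
        rw [show suitTable = [('c', "clubs")] ++ ('d', "diamonds") ::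
              [('h', "hearts"), ('s', "spades")] from rfl]
        exact (pv_case rest 'd' _ _ "diamonds" (by decide)).symm
      · by_cases e3 : i = 'h'
        · subst e3
          rw [show defineSuitLoop ('h' :: rest) = some "hearts" from rfl]
          simp only [suitPairs]
          rw [show suitTable = [('c', "clubs"), ('d', "diamonds")] ++ ('h', "hearts") ::
                [('s', "spades")] from rfl]
          exact (pv_case rest 'h' _ _ "hearts" (by decide)).symm
        · by_cases e4 : i = 's'
          · subst e4
            rw [show defineSuitLoop ('s' :: rest) = some "spades" from rfl]
            simp only [suitPairs]
            rw [show suitTable = [('c', "clubs"), ('d', "diamonds"), ('h', "hearts")] ++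
                  ('s', "spades") :: [] from rfl]
            exact (pv_case rest 's' _ _ "spades" (by decide)).symm
          · have hne : ∀ p ∈ suitTable, i ≠ p.1 := by
              intro p hp
              fin_cases hp <;> simpa using ‹_›
            rw [show defineSuitLoop (i :: rest) = defineSuitLoop rest by
                  simp [defineSuitLoop, e1, e2, e3, e4]]
            simp only [suitPairs]
            rw [pv_pairs_shift_gen rest i suitTable hne, pv_min_shift, ih]
            simp only [suitPairs]
            cases PySem.List.min? ((suitTable.map
                (fun p => (PySem.Chars.find rest [p.1], p.2))).filter
              (fun q => !(q.1 == -1))) (fun q => q.1) <;> rfl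

-- ===== VERDICT (by name: the statement is the Claim_ definition above) =====
theorem define_suit_spec : Claim_equal_define_suit := by
  intro card _
  unfold Spec_define_suit define_suit define_suit_alt
  exact pv_key _
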